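-- pv_equiv track=rewrite | github.com/Ola-zaw/Algebra-in-SET | SET_2.py | find_plane
-- ===== SOURCE A (Python) =====
-- def find_set(card_1, card_2):
--     card_3 = [0, 0, 0, 0]
--     for i in range(4):
--         card_3[i] = (3 - card_1[i] - card_2[i]) % 3
--     return card_3
--
-- def find_plane(cards):
--     plane = [[0]*3 for i in range(3)]
--     plane[0][0] = cards[0]
--     plane[0][1] = cards[1]
--     plane[0][2] = find_set(cards[0], cards[1])
--     plane[1][0] = cards[2]
--     plane[2][0] = find_set(cards[0], cards[2])
--     plane[2][2] = find_set(cards[1], cards[2])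
--     plane[1][1] = find_set(cards[0], plane[2][2])
--     plane[1][2] = find_set(cards[1], plane[2][0])
--     plane[2][1] = find_set(cards[2], plane[0][2])
--     return plane
-- ===== SOURCE B (Python) =====
-- def find_plane(cards):
--     # Affine F_3 plane: row/column step vectors from the three seed cards.
--     c0, c1, c2 = cards[0], cards[1], cards[2]
--     v1 = [c2[k] - c0[k] for k in range(4)]
--     v2 = [c1[k] - c0[k] for k in range(4)]
--     plane = []
--     for i in range(3):
--         row = []
--         for j in range(3):
--             if i == 0 and j == 0:
--                 row.append(c0)
--             elif i == 0 and j == 1: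
--                 row.append(c1)
--             elif i == 1 and j == 0:
--                 row.append(c2)
--             else:
--                 row.append([(c0[k] + i * v1[k] + j * v2[k]) % 3 for k in range(4)])
--         plane.append(row)
--     return plane
-- ===== Notes on version B (the rewrite author's own statement) =====
-- stated objective: idiomatic
-- what changed: Replaces A's chain of six pairwise find_set calls (some fed by earlier results) with a uniform closed-form affine-grid formula (c0 + i*v1 + j*v2) mod 3 computed in one double loop, with the three seed cards placed directly.
import Mathlib
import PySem

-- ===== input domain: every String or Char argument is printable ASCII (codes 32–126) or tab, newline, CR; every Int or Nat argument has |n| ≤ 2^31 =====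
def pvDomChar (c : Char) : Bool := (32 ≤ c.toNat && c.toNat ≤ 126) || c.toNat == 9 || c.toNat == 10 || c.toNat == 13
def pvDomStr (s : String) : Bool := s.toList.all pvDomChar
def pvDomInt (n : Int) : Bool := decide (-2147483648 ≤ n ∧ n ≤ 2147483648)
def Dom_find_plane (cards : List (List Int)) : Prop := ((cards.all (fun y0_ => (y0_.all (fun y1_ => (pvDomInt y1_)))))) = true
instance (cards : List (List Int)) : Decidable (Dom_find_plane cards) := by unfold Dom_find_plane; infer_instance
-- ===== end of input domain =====

-- B replaces A's chain of pairwise find_set calls by one closed-form affine F_3 grid formula (idiomatic; same cost).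


-- ===== PORT A =====
-- find_set: card_3 = [0,0,0,0]; for i in range(4): card_3[i] = (3 - card_1[i] - card_2[i]) % 3
-- (pyGetD's default is unreachable under Pre_find_plane, which demands length ≥ 4)
def find_set (card_1 card_2 : List Int) : List Int :=
  (PySem.List.pyRange 0 4 1).foldl
    (fun card_3 i =>
      PySem.List.pySetD card_3 i
        (PySem.Int.mod (3 - PySem.List.pyGetD card_1 i 0 - PySem.List.pyGetD card_2 i 0) 3))
    [0, 0, 0, 0]

def find_plane (cards : List (List Int)) : List (List (List Int)) :=
  -- plane = [[0]*3 for i in range(3)]; every cell is overwritten, in A's order: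
  let p00 := PySem.List.pyGetD cards 0 []
  let p01 := PySem.List.pyGetD cards 1 []
  let p02 := find_set (PySem.List.pyGetD cards 0 []) (PySem.List.pyGetD cards 1 [])
  let p10 := PySem.List.pyGetD cards 2 []
  let p20 := find_set (PySem.List.pyGetD cards 0 []) (PySem.List.pyGetD cards 2 [])
  let p22 := find_set (PySem.List.pyGetD cards 1 []) (PySem.List.pyGetD cards 2 [])
  let p11 := find_set (PySem.List.pyGetD cards 0 []) p22
  let p12 := find_set (PySem.List.pyGetD cards 1 []) p20
  let p21 := find_set (PySem.List.pyGetD cards 2 []) p02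
  [[p00, p01, p02], [p10, p11, p12], [p20, p21, p22]]

-- ===== PORT B =====
def find_plane_alt (cards : List (List Int)) : List (List (List Int)) :=
  let c0 := PySem.List.pyGetD cards 0 []
  let c1 := PySem.List.pyGetD cards 1 []
  let c2 := PySem.List.pyGetD cards 2 []
  let v1 := (PySem.List.pyRange 0 4 1).map
    (fun k => PySem.List.pyGetD c2 k 0 - PySem.List.pyGetD c0 k 0)
  let v2 := (PySem.List.pyRange 0 4 1).map
    (fun k => PySem.List.pyGetD c1 k 0 - PySem.List.pyGetD c0 k 0)
  (PySem.List.pyRange 0 3 1).map (fun i =>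
    (PySem.List.pyRange 0 3 1).map (fun j =>
      if i = 0 ∧ j = 0 then c0
      else if i = 0 ∧ j = 1 then c1
      else if i = 1 ∧ j = 0 then c2
      else (PySem.List.pyRange 0 4 1).map (fun k =>
        PySem.Int.mod
          (PySem.List.pyGetD c0 k 0 + i * PySem.List.pyGetD v1 k 0
            + j * PySem.List.pyGetD v2 k 0) 3)))

-- ===== PRECONDITION & SPEC =====
-- Pre_ = exactly the inputs A accepts: at least three cards, and the three cards it reads
-- each have at least the four features find_set indexes (otherwise Python raises IndexError).
def Pre_find_plane (cards : List (List Int)) : Prop :=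
  3 ≤ cards.length ∧ 4 ≤ (cards.getD 0 []).length ∧ 4 ≤ (cards.getD 1 []).length
    ∧ 4 ≤ (cards.getD 2 []).length
instance (cards : List (List Int)) : Decidable (Pre_find_plane cards) := by
  unfold Pre_find_plane; infer_instance

def pvWitness_find_plane : List (List Int) :=
  [[0, 1, 2, 0], [1, 1, 0, 2], [2, 0, 1, 1]]

def Spec_find_plane (cards : List (List Int)) (out : List (List (List Int))) : Prop :=
  out = find_plane_alt cards
instance (cards : List (List Int)) (out : List (List (List Int))) :
    Decidable (Spec_find_plane cards out) := by unfold Spec_find_plane; infer_instance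

-- ===== CLAIM (what is proved, stated in full; the proofs are below) =====
def Claim_equal_find_plane : Prop :=
  ∀ (cards : List (List Int)), Dom_find_plane cards → Pre_find_plane cards →
    Spec_find_plane cards (find_plane cards)

-- ===== LEMMAS AND PROOFS =====

-- ===== VERDICT (by name: the statement is the Claim_ definition above) =====
theorem find_plane_spec : Claim_equal_find_plane := by
  intro cards _dom pre
  obtain ⟨hlen, h0, h1, h2⟩ := pre
  rcases cards with _ | ⟨c0, _ | ⟨c1, _ | ⟨c2, rest⟩⟩⟩ <;> simp_all
  rcases c0 with _ | ⟨a0, _ | ⟨a1, _ | ⟨a2, _ | ⟨a3, t0⟩⟩⟩⟩ <;> simp_all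
  rcases c1 with _ | ⟨b0, _ | ⟨b1, _ | ⟨b2, _ | ⟨b3, t1⟩⟩⟩⟩ <;> simp_all
  rcases c2 with _ | ⟨d0, _ | ⟨d1, _ | ⟨d2, _ | ⟨d3, t2⟩⟩⟩⟩ <;> simp_all
  unfold Spec_find_plane find_plane find_plane_alt find_set
  simp [PySem.List.pyRange_one, List.range_succ, PySem.List.pyGetD_ofNat',
    PySem.List.pySetD, PySem.List.pySet?, PySem.List.pyIdx?, PySem.Int.mod, Int.fmod_eq_emod]
  omega
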